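-- pv_equiv track=rewrite | github.com/lightkuriboh/daily_downloader | utils.py | get_date_from_filename
-- ===== SOURCE A (Python) =====
-- def get_date_from_filename(file_name):
--     def parse_date(date_string: str):
--         return '-'.join([date_string[0:4], date_string[4:6], date_string[6:8]])
--
--     date_length = 4 + 2 + 2
--
--     counter = 0
--     date = ''
--     for ch in file_name:
--         if '0' <= ch <= '9':
--             counter += 1
--             date += ch
--         else:
--             counter -= counter
--             date = ''
--         if counter == date_length:
--             return parse_date(date)
--     return parse_date('19700101')
-- ===== SOURCE B (Python) =====
-- import re
--
-- def get_date_from_filename(file_name):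
--     m = re.search(r'[0-9]{8}', file_name)
--     s = m.group() if m else '19700101'
--     return '-'.join([s[0:4], s[4:6], s[6:8]])
-- ===== Notes on version B (the rewrite author's own statement) =====
-- stated objective: idiomatic
-- what changed: Replaced the manual counter/accumulator scan with a single regex search for the leftmost run of 8 ASCII digits ([0-9]{8}), then slice-and-join once.
import Mathlib
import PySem

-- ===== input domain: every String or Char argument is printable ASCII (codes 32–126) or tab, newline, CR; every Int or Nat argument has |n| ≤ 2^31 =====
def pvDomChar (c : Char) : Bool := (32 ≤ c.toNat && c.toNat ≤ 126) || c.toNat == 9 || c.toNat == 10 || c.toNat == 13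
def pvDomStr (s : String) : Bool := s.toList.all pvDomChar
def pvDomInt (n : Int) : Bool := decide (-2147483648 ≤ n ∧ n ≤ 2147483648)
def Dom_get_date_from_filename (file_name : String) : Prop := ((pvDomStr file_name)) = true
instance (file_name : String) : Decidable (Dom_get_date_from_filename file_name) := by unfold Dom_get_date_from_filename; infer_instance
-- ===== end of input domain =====

-- B replaces A's manual counter/accumulator character loop with a regex-style leftmost
-- search for a run of 8 ASCII digits, then formats once; objective: idiomatic.

-- ===== PORT A =====

def pvIsDig (c : Char) : Bool := decide ('0' ≤ c) && decide (c ≤ '9')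

-- parse_date: '-'.join([s[0:4], s[4:6], s[6:8]])
def pvParseDateA (s : String) : String :=
  String.mk (PySem.List.slice s.toList (some 0) (some 4) ++
             '-' :: PySem.List.slice s.toList (some 4) (some 6) ++
             '-' :: PySem.List.slice s.toList (some 6) (some 8))

-- the for-loop with early return, state (counter, date)
def pvLoopA : List Char → Int → List Char → String
  | [], _, _ => pvParseDateA "19700101"
  | c :: t, counter, date =>
    let counter' := if pvIsDig c then counter + 1 else counter - counter
    let date' := if pvIsDig c then date ++ [c] else []
    if counter' == 8 then pvParseDateA (String.mk date') else pvLoopA t counter' date'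

def get_date_from_filename (file_name : String) : String :=
  pvLoopA file_name.toList 0 []

-- ===== PORT B =====

-- re.search(r'[0-9]{8}', s): leftmost match of 8 consecutive ASCII digits.
-- Hand port, exact for this pattern: the leftmost match is the first position whose
-- next 8 characters are all ASCII digits.
def pvSearch8 : List Char → Option (List Char)
  | [] => none
  | c :: t =>
    if 8 ≤ (c :: t).length && ((c :: t).take 8).all pvIsDig then some ((c :: t).take 8)
    else pvSearch8 t

def get_date_from_filename_alt (file_name : String) : String :=
  let s : String := match pvSearch8 file_name.toList with
    | some d => String.mk d
    | none => "19700101"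
  String.mk (PySem.List.slice s.toList (some 0) (some 4) ++
             '-' :: PySem.List.slice s.toList (some 4) (some 6) ++
             '-' :: PySem.List.slice s.toList (some 6) (some 8))

-- ===== PRECONDITION & SPEC =====
def Spec_get_date_from_filename (file_name : String) (out : String) : Prop := out = get_date_from_filename_alt file_name
instance (file_name : String) (out : String) : Decidable (Spec_get_date_from_filename file_name out) := by unfold Spec_get_date_from_filename; infer_instance

-- ===== CLAIM (what is proved, stated in full; the proofs are below) =====
def Claim_equal_get_date_from_filename : Prop := ∀ (file_name : String), Dom_get_date_from_filename file_name → Spec_get_date_from_filename file_name (get_date_from_filename file_name)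

-- ===== LEMMAS AND PROOFS =====

-- B's formatting of the search result, as a function of the Option
def pvFmt (o : Option (List Char)) : String :=
  let s : String := match o with
    | some d => String.mk d
    | none => "19700101"
  String.mk (PySem.List.slice s.toList (some 0) (some 4) ++
             '-' :: PySem.List.slice s.toList (some 4) (some 6) ++
             '-' :: PySem.List.slice s.toList (some 6) (some 8))

lemma pvFmt_eq (o : Option (List Char)) :
    pvFmt o = (match o with
      | some d => pvParseDateA (String.mk d)
      | none => pvParseDateA "19700101") := by
  cases o <;> rfl

lemma pvSearch8_short (l : List Char) (h : l.length < 8) : pvSearch8 l = none := by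
  induction l with
  | nil => rfl
  | cons c t ih =>
    simp only [pvSearch8]
    rw [if_neg, ih (by simp only [List.length_cons] at h ⊢; omega)]
    intro hcontra
    simp only [Bool.and_eq_true, decide_eq_true_eq] at hcontra
    omega

lemma pvSearch8_skip (d : List Char) (c : Char) (t : List Char)
    (hlen : d.length < 8) (hc : pvIsDig c = false) :
    pvSearch8 (d ++ c :: t) = pvSearch8 t := by
  induction d with
  | nil =>
    simp only [List.nil_append, pvSearch8]
    rw [if_neg]
    simp [List.all_cons, hc]
  | cons a d' ih =>
    simp only [List.cons_append, pvSearch8]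
    rw [if_neg, ih (by simp at hlen ⊢; omega)]
    intro hcontra
    simp only [Bool.and_eq_true, List.all_eq_true] at hcontra
    obtain ⟨hl, hall⟩ := hcontra
    have hmem : c ∈ (a :: (d' ++ c :: t)).take 8 := by
      have : (a :: (d' ++ c :: t)).take 8 = (a :: d') ++ (c :: t).take (8 - (a :: d').length) := by
        rw [show a :: (d' ++ c :: t) = (a :: d') ++ (c :: t) from rfl,
            List.take_append, List.take_of_length_le (by simp at hlen ⊢; omega)]
      rw [this]
      have h1 : 1 ≤ 8 - (a :: d').length := by simp at hlen ⊢; omega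
      refine List.mem_append_right _ ?_
      cases h : 8 - (a :: d').length with
      | zero => omega
      | succ n => simp [List.take_succ_cons]
    have := hall c hmem
    rw [hc] at this
    exact absurd this (by simp)

lemma pvSearch8_found (d : List Char) (t : List Char)
    (hlen : d.length = 8) (hall : d.all pvIsDig = true) :
    pvSearch8 (d ++ t) = some d := by
  cases d with
  | nil => simp at hlen
  | cons a d' =>
    have htake : (a :: (d' ++ t)).take 8 = a :: d' := by
      rw [show a :: (d' ++ t) = (a :: d') ++ t from rfl, List.take_append,
          List.take_of_length_le (le_of_eq hlen), hlen]
      simp only [Nat.sub_self, List.take_zero, List.append_nil]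
    simp only [List.cons_append, pvSearch8]
    rw [if_pos, htake]
    rw [htake, hall]
    simp only [Bool.and_true, decide_eq_true_eq, List.length_cons, List.length_append]
    simp only [List.length_cons] at hlen
    omega

-- Main invariant: from a state whose accumulated digit run is d (all digits, < 8 long,
-- counter = |d|), A's loop over xs computes B's leftmost-window search over d ++ xs.
lemma pvLoop_eq (xs : List Char) (d : List Char)
    (hall : d.all pvIsDig = true) (hlen : d.length < 8) :
    pvLoopA xs (d.length : Int) d = pvFmt (pvSearch8 (d ++ xs)) := by
  induction xs generalizing d with
  | nil =>
    rw [pvSearch8_short (d ++ []) (by simpa using hlen)]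
    simp [pvLoopA, pvFmt_eq]
  | cons c t ih =>
    by_cases hc : pvIsDig c = true
    · simp only [pvLoopA, hc, if_true]
      have hd' : (d ++ [c]).all pvIsDig = true := by simp [List.all_append, hall, hc]
      by_cases h8 : d.length + 1 = 8
      · rw [if_pos (by simp; omega)]
        have : pvSearch8 (d ++ c :: t) = some (d ++ [c]) := by
          rw [show d ++ c :: t = (d ++ [c]) ++ t by simp]
          exact pvSearch8_found _ _ (by simp [h8]) hd'
        rw [this, pvFmt_eq]
      · rw [if_neg (by simp; omega)]
        have := ih (d ++ [c]) hd' (by simp; omega)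
        rw [show ((d.length : Int) + 1) = ((d ++ [c]).length : Int) by simp]
        rw [this, show (d ++ [c]) ++ t = d ++ c :: t by simp]
    · simp only [Bool.not_eq_true] at hc
      simp only [pvLoopA, hc, Bool.false_eq_true, if_false]
      have hz : ((d.length : Int) - (d.length : Int)) = 0 := by ring
      rw [hz, if_neg (by simp)]
      have h0 := ih [] (by simp) (by simp)
      simp only [List.length_nil, Nat.cast_zero, List.nil_append] at h0
      rw [h0, pvSearch8_skip d c t hlen hc]

-- ===== VERDICT (by name: the statement is the Claim_ definition above) =====
theorem get_date_from_filename_spec : Claim_equal_get_date_from_filename := by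
  intro s _
  show get_date_from_filename s = get_date_from_filename_alt s
  have h := pvLoop_eq s.toList [] (by simp) (by simp)
  simp only [List.length_nil, Int.ofNat_zero, List.nil_append] at h
  rw [get_date_from_filename, h]
  rw [show get_date_from_filename_alt s = pvFmt (pvSearch8 s.toList) from rfl]
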